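-- pv_equiv track=rewrite | github.com/SCORLEOs773/linguaevo | backend/app/main.py | apply_sound_changes
-- ===== SOURCE A (Python) =====
-- from typing import List, Dict
--
-- def is_vowel(char: str) -> bool:
--     vowels = set("aeiouɑɛɪɔʊə")
--     return char.lower() in vowels
--
-- def apply_sound_changes(word: str, rules: List[Dict]) -> str:
--     result = word
--     for rule in rules:
--         before = rule.get("before", "")
--         after = rule.get("after", "")
--         env = rule.get("environment")
--
--         if not before or not after:
--             continue
--
--         if not env:
--             # Simple replacement
--             result = result.replace(before, after)
--             continue
--
--         # Environment-aware replacement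
--         new_result = ""
--         i = 0
--         while i < len(result):
--             if result[i:i + len(before)] == before:
--                 match = True
--
--                 if env == "_V":  # before vowel
--                     if i + len(before) >= len(result) or not is_vowel(result[i + len(before)]):
--                         match = False
--                 elif env == "V_":  # after vowel
--                     if i == 0 or not is_vowel(result[i - 1]):
--                         match = False
--
--                 if match:
--                     new_result += after
--                     i += len(before)
--                     continue
--
--             new_result += result[i]
--             i += 1
--
--         result = new_result
--     return result
-- ===== SOURCE B (Python) =====
-- from typing import List, Dict
--
-- _VOWELS = set("aeiouɑɛɪɔʊə")
--
--
-- def _env_holds(result: str, i: int, k: int, env) -> bool: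
--     if env == "_V":
--         return i + k < len(result) and result[i + k].lower() in _VOWELS
--     if env == "V_":
--         return i > 0 and result[i - 1].lower() in _VOWELS
--     return True
--
--
-- def apply_sound_changes(word: str, rules: List[Dict]) -> str:
--     result = word
--     for rule in rules:
--         before = rule.get("before", "")
--         after = rule.get("after", "")
--         env = rule.get("environment")
--         if not before or not after:
--             continue
--         k = len(before)
--         # stage 1: every position where `before` occurs with its environment satisfied
--         candidates = [i for i in range(len(result))
--                       if result[i:i + k] == before and _env_holds(result, i, k, env)]
--         # stage 2: greedy left-to-right non-overlapping selection
--         chosen = []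
--         last_end = 0
--         for i in candidates:
--             if i >= last_end:
--                 chosen.append(i)
--                 last_end = i + k
--         # stage 3: stitch the output from the slices between chosen matches
--         parts = []
--         prev = 0
--         for i in chosen:
--             parts.append(result[prev:i])
--             parts.append(after)
--             prev = i + k
--         parts.append(result[prev:])
--         result = "".join(parts)
--     return result
-- ===== Notes on version B (the rewrite author's own statement) =====
-- stated objective: alternative
-- what changed: B replaces A's two code paths (str.replace and a one-pass while-loop that builds the output character by character) with one unified three-stage pipeline per rule: first list every position where `before` occurs with its environment satisfied, then greedily select non-overlapping positions left to right, then stitch the output from the untouched slices between the selected matches.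
import Mathlib
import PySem

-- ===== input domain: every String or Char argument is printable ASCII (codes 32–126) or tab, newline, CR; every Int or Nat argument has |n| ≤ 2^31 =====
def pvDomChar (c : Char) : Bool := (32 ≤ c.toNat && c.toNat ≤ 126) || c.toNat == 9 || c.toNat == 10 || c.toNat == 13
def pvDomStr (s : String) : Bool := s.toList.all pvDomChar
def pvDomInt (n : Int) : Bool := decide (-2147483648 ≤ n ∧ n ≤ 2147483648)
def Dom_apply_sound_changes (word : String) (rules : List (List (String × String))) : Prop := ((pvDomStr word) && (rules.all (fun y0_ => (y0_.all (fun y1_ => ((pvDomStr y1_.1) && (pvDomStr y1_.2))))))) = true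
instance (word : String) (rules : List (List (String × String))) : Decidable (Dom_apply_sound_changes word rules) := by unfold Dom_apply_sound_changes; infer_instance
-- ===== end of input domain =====

-- B replaces A's two code paths (str.replace for plain rules / a one-pass while loop building the
-- output character by character for environment rules) by one unified three-stage pipeline per rule:
-- list all environment-valid match positions, greedily pick non-overlapping ones left to right, then
-- stitch the output from the slices between the picks; objective: alternative.

-- ===== PORT A =====
-- is_vowel: char.lower() in set("aeiouɑɛɪɔʊə")  (set membership = membership in the distinct chars)
def pvIsVowelA (c : Char) : Bool :=
  ['a','e','i','o','u','ɑ','ɛ','ɪ','ɔ','ʊ','ə'].contains (PySem.Chars.lowerChar c)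

-- A's environment-aware while loop, index i over res; fuel ≥ res.length - i makes it total
-- (A only runs it with before ≠ "", where every iteration advances i by at least 1).
-- result[i:i+len(before)] with 0 ≤ i is exactly (res.drop i).take before.length.
def pvScanA (res before after : List Char) (env : String) : Nat → Nat → List Char
  | 0, _ => []
  | fuel + 1, i =>
    if i < res.length then
      if (res.drop i).take before.length = before then
        let m : Bool :=
          if env = "_V" then
            if res.length ≤ i + before.length then false
            else if pvIsVowelA (res.getD (i + before.length) ' ') then true else false
          else if env = "V_" then
            if i = 0 then false
            else if pvIsVowelA (res.getD (i - 1) ' ') then true else false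
          else true
        if m then after ++ pvScanA res before after env fuel (i + before.length)
        else res.getD i ' ' :: pvScanA res before after env fuel (i + 1)
      else res.getD i ' ' :: pvScanA res before after env fuel (i + 1)
    else []

-- the body of A's `for rule in rules` loop
def pvRuleA (result : String) (rule : List (String × String)) : String :=
  let before := PySem.Dict.getD (PySem.Dict.mk rule) "before" ""
  let after := PySem.Dict.getD (PySem.Dict.mk rule) "after" ""
  let env := (PySem.Dict.get? (PySem.Dict.mk rule) "environment").getD ""
  if before = "" ∨ after = "" then result
  else if env = "" then PySem.Str.replace result before after
  else String.ofList (pvScanA result.toList before.toList after.toList env result.toList.length 0)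

def apply_sound_changes (word : String) (rules : List (List (String × String))) : String :=
  rules.foldl pvRuleA word

-- ===== PORT B =====
def pvVowelsB : List Char := ['a','e','i','o','u','ɑ','ɛ','ɪ','ɔ','ʊ','ə']

def pvIsVowelB (c : Char) : Bool := pvVowelsB.contains (PySem.Chars.lowerChar c)

-- B's _env_holds(result, i, k, env)
def pvEnvHolds (res : List Char) (i k : Nat) (env : String) : Bool :=
  if env = "_V" then decide (i + k < res.length) && pvIsVowelB (res.getD (i + k) ' ')
  else if env = "V_" then decide (0 < i) && pvIsVowelB (res.getD (i - 1) ' ')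
  else true

-- the candidate-comprehension condition: result[i:i+k] == before and _env_holds(result, i, k, env)
def pvCondB (res before : List Char) (env : String) (i : Nat) : Bool :=
  decide ((res.drop i).take before.length = before) && pvEnvHolds res i before.length env

-- stage 2: the `for i in candidates` greedy-selection loop (chosen, last_end start as [], 0)
def pvChosen (k : Nat) (cands : List Nat) : List Nat :=
  (cands.foldl (fun (st : List Nat × Nat) i =>
    if st.2 ≤ i then (st.1 ++ [i], i + k) else st) (([] : List Nat), 0)).1

-- stage 3: the `for i in chosen` stitching loop followed by the final slice and "".join
def pvStitch (res after : List Char) (k : Nat) (chosen : List Nat) : List Char :=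
  let fin := chosen.foldl (fun (st : List (List Char) × Nat) i =>
    (st.1 ++ [(res.drop st.2).take (i - st.2), after], i + k)) (([] : List (List Char)), 0)
  (fin.1 ++ [res.drop fin.2]).flatten

-- B's per-rule body
def pvRuleB (result : String) (rule : List (String × String)) : String :=
  let before := PySem.Dict.getD (PySem.Dict.mk rule) "before" ""
  let after := PySem.Dict.getD (PySem.Dict.mk rule) "after" ""
  let env := (PySem.Dict.get? (PySem.Dict.mk rule) "environment").getD ""
  if before = "" ∨ after = "" then result
  else
    String.ofList (pvStitch result.toList after.toList before.toList.length
      (pvChosen before.toList.length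
        ((List.range result.toList.length).filter (pvCondB result.toList before.toList env))))

def apply_sound_changes_alt (word : String) (rules : List (List (String × String))) : String :=
  rules.foldl pvRuleB word

-- ===== PRECONDITION & SPEC =====
def Spec_apply_sound_changes (word : String) (rules : List (List (String × String))) (out : String) : Prop := out = apply_sound_changes_alt word rules
instance (word : String) (rules : List (List (String × String))) (out : String) : Decidable (Spec_apply_sound_changes word rules out) := by unfold Spec_apply_sound_changes; infer_instance

-- ===== CLAIM (what is proved, stated in full; the proofs are below) =====
def Claim_equal_apply_sound_changes : Prop := ∀ (word : String) (rules : List (List (String × String))), Dom_apply_sound_changes word rules → Spec_apply_sound_changes word rules (apply_sound_changes word rules)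

-- ===== LEMMAS AND PROOFS =====

-- proof-only intermediate: a suffix-consuming scan bridging PySem.Chars.replace to pvScanA
def pvOkB (env : String) (prev : Option Char) (nxt : Option Char) : Bool :=
  if env = "" then true
  else if env = "_V" then
    match nxt with | some c => pvIsVowelB c | none => false
  else if env = "V_" then
    match prev with | some c => pvIsVowelB c | none => false
  else true

def pvScanB (b : Char) (bs after : List Char) (env : String) : Option Char → List Char → List Char
  | _, [] => []
  | prev, c :: rest =>
    if (b :: bs).isPrefixOf (c :: rest) && pvOkB env prev (rest.drop bs.length).head? then
      after ++ pvScanB b bs after env (b :: bs).getLast? (rest.drop bs.length)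
    else c :: pvScanB b bs after env (some c) rest
termination_by _ l => l.length
decreasing_by all_goals simp

theorem pvIsVowel_eq (c : Char) : pvIsVowelA c = pvIsVowelB c := rfl

theorem pvIteVowel (c : Char) :
    (if pvIsVowelA c = true then true else false) = pvIsVowelB c := by
  rw [pvIsVowel_eq]; cases pvIsVowelB c <;> simp

theorem pvOkB_empty (prev nxt : Option Char) : pvOkB "" prev nxt = true := by
  simp [pvOkB]

-- the replace scan (PySem.Chars.replace.go) is pvScanB with the always-true environment ""
theorem pvGo_eq_scanB (b : Char) (bs new : List Char) :
    ∀ (fuel : Nat) (l acc : List Char) (prev : Option Char), l.length ≤ fuel →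
      PySem.Chars.replace.go (b :: bs) new fuel l acc =
        acc.reverse ++ pvScanB b bs new "" prev l := by
  intro fuel
  induction fuel with
  | zero =>
    intro l acc prev hl
    have : l = [] := by cases l <;> simp_all
    subst this
    simp [PySem.Chars.replace.go, pvScanB]
  | succ fuel ih =>
    intro l acc prev hl
    cases l with
    | nil => simp [PySem.Chars.replace.go, pvScanB]
    | cons c rest =>
      rw [PySem.Chars.replace.go, pvScanB]
      simp only [pvOkB_empty, Bool.and_true]
      cases hp : (b :: bs).isPrefixOf (c :: rest) with
      | true =>
        simp only [reduceIte]
        rw [ih _ _ (b :: bs).getLast? (by simp at hl ⊢; omega)]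
        simp [List.drop_succ_cons]
      | false =>
        simp only [Bool.false_eq_true, if_false]
        rw [ih _ _ (some c) (by simpa using hl)]
        simp

theorem pvReplace_eq_scanB (s new : List Char) (b : Char) (bs : List Char) :
    PySem.Chars.replace s (b :: bs) new = pvScanB b bs new "" none s := by
  rw [PySem.Chars.replace]
  simp only [List.isEmpty_cons, Bool.false_eq_true, if_false]
  simpa using pvGo_eq_scanB b bs new s.length s [] none (le_refl _)

-- A's index scan equals the suffix scan, given the prev-character invariant
theorem pvScanA_eq_scanB (res after : List Char) (env : String) (b : Char) (bs : List Char) :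
    ∀ (fuel i : Nat) (prev : Option Char),
      res.length - i ≤ fuel → i ≤ res.length →
      prev = (if i = 0 then none else res[i - 1]?) →
      pvScanA res (b :: bs) after env fuel i = pvScanB b bs after env prev (res.drop i) := by
  intro fuel
  induction fuel with
  | zero =>
    intro i prev hf hi hprev
    have : i = res.length := by omega
    subst this
    simp [pvScanA, pvScanB]
  | succ fuel ih =>
    intro i prev hf hi hprev
    by_cases h : i < res.length
    · have hdrop : res.drop i = res[i] :: res.drop (i + 1) := List.drop_eq_getElem_cons h
      rw [pvScanA, if_pos h, hdrop, pvScanB]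
      have hcons : res[i] :: res.drop (i + 1) = res.drop i := hdrop.symm
      rw [hcons]
      have hnxt : ((res.drop (i + 1)).drop bs.length).head? = res[i + (bs.length + 1)]? := by
        rw [List.drop_drop, List.head?_drop]
        congr 1
        omega
      by_cases hp : (b :: bs) <+: res.drop i
      · have hpb : (b :: bs).isPrefixOf (res.drop i) = true := List.isPrefixOf_iff_prefix.mpr hp
        have hptake : (res.drop i).take (b :: bs).length = (b :: bs) :=
          (List.prefix_iff_eq_take.mp hp).symm
        have hklen : i + (bs.length + 1) ≤ res.length := by
          have := hp.length_le
          simp at this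
          omega
        rw [if_pos hptake]
        -- A's match-flag m equals pvOkB
        have hm : (if env = "_V" then
              if res.length ≤ i + (b :: bs).length then false
              else if pvIsVowelA (res.getD (i + (b :: bs).length) ' ') then true else false
            else if env = "V_" then
              if i = 0 then false
              else if pvIsVowelA (res.getD (i - 1) ' ') then true else false
            else true)
            = pvOkB env prev ((res.drop (i + 1)).drop bs.length).head? := by
          rw [hnxt]
          unfold pvOkB
          by_cases he0 : env = ""
          · simp [he0]
          · rw [if_neg he0]
            by_cases heV : env = "_V"
            · simp only [if_pos heV, List.length_cons]
              by_cases hend : res.length ≤ i + (bs.length + 1)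
              · rw [if_pos hend]
                have : res[i + (bs.length + 1)]? = none := by
                  rw [List.getElem?_eq_none_iff]; omega
                rw [this]
              · rw [if_neg hend]
                have hlt : i + (bs.length + 1) < res.length := by omega
                rw [List.getElem?_eq_getElem hlt]
                simp only [List.getD_eq_getElem res ' ' hlt]
                exact pvIteVowel _
            · rw [if_neg heV, if_neg heV]
              by_cases heP : env = "V_"
              · simp only [if_pos heP]
                by_cases hi0 : i = 0
                · rw [if_pos hi0, hprev, if_pos hi0]
                · rw [if_neg hi0, hprev, if_neg hi0]
                  have hlt : i - 1 < res.length := by omega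
                  rw [List.getElem?_eq_getElem hlt]
                  simp only [List.getD_eq_getElem res ' ' hlt]
                  exact pvIteVowel _
              · rw [if_neg heP, if_neg heP]
        rw [hm, hpb, Bool.true_and]
        cases hok : pvOkB env prev ((res.drop (i + 1)).drop bs.length).head? with
        | true =>
          simp only [reduceIte]
          have hdd : (res.drop (i + 1)).drop bs.length = res.drop (i + (bs.length + 1)) := by
            rw [List.drop_drop]; congr 1; omega
          rw [hdd]
          congr 1
          have hidx : res[i + bs.length]? = (b :: bs)[bs.length]? := by
            have h2 : (res.drop i)[bs.length]? = (b :: bs)[bs.length]? := by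
              obtain ⟨t, ht⟩ := hp
              rw [← ht, List.getElem?_append_left (by simp)]
            rw [← h2, List.getElem?_drop]
          have hlast : (b :: bs).getLast? = res[i + (bs.length + 1) - 1]? := by
            rw [List.getLast?_eq_getElem?]
            have h3 : i + (bs.length + 1) - 1 = i + bs.length := by omega
            simp only [List.length_cons]
            rw [h3, hidx]
            simp
          exact ih (i + (bs.length + 1)) ((b :: bs).getLast?)
            (by omega)
            hklen (by rw [if_neg (by omega), hlast])
        | false =>
          simp only [Bool.false_eq_true, if_false]
          rw [List.getD_eq_getElem res ' ' h]
          congr 1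
          exact ih (i + 1) (some res[i]) (by omega) (by omega)
            (by rw [if_neg (by omega)]; simp [List.getElem?_eq_getElem h])
      · have hpb : (b :: bs).isPrefixOf (res.drop i) = false := by
          rw [Bool.eq_false_iff]
          intro hc
          exact hp (List.isPrefixOf_iff_prefix.mp hc)
        have hptake : ¬ ((res.drop i).take (b :: bs).length = (b :: bs)) := by
          intro hc
          exact hp (List.prefix_iff_eq_take.mpr hc.symm)
        rw [if_neg hptake, hpb, Bool.false_and, if_neg (by simp)]
        rw [List.getD_eq_getElem res ' ' h]
        congr 1
        exact ih (i + 1) (some res[i]) (by omega) (by omega)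
          (by rw [if_neg (by omega)]; simp [List.getElem?_eq_getElem h])
    · have hlen : i = res.length := by omega
      rw [pvScanA, if_neg h]
      rw [List.drop_of_length_le (by omega)]
      rw [pvScanB]

-- ===== proof-side recursive forms of B's two foldl loops =====
def pvG (k : Nat) : List Nat → Nat → List Nat
  | [], _ => []
  | x :: xs, e => if e ≤ x then x :: pvG k xs (x + k) else pvG k xs e

def pvS (res after : List Char) (k : Nat) : Nat → List Nat → List Char
  | prev, [] => res.drop prev
  | prev, i :: is => (res.drop prev).take (i - prev) ++ after ++ pvS res after k (i + k) is

theorem pvChosen_eq_G (k : Nat) :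
    ∀ (L : List Nat) (acc : List Nat) (e : Nat),
      (L.foldl (fun (st : List Nat × Nat) i =>
        if st.2 ≤ i then (st.1 ++ [i], i + k) else st) (acc, e)).1 = acc ++ pvG k L e := by
  intro L
  induction L with
  | nil => intro acc e; simp [pvG]
  | cons x xs ih =>
    intro acc e
    rw [List.foldl_cons, pvG]
    by_cases h : e ≤ x
    · rw [if_pos h, if_pos h]
      rw [ih]
      simp
    · rw [if_neg h, if_neg h]
      exact ih acc e

theorem pvStitch_eq_S (res after : List Char) (k : Nat) :
    ∀ (L : List Nat) (parts : List (List Char)) (prev : Nat),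
      ((L.foldl (fun (st : List (List Char) × Nat) i =>
          (st.1 ++ [(res.drop st.2).take (i - st.2), after], i + k)) (parts, prev)).1
        ++ [res.drop (L.foldl (fun (st : List (List Char) × Nat) i =>
          (st.1 ++ [(res.drop st.2).take (i - st.2), after], i + k)) (parts, prev)).2]).flatten
      = parts.flatten ++ pvS res after k prev L := by
  intro L
  induction L with
  | nil => intro parts prev; simp [pvS]
  | cons i is ih =>
    intro parts prev
    rw [List.foldl_cons, pvS]
    rw [ih]
    simp

-- g skips every element below e' without changing state
theorem pvG_shift (k : Nat) :
    ∀ (L : List Nat) (e e' : Nat), e ≤ e' → (∀ x ∈ L, x < e' → x < e) → pvG k L e = pvG k L e' := by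
  intro L
  induction L with
  | nil => intro e e' _ _; rfl
  | cons x xs ih =>
    intro e e' hle hno
    rw [pvG, pvG]
    by_cases h : e' ≤ x
    · rw [if_pos h, if_pos (le_trans hle h)]
    · have hx : x < e := hno x (by simp) (by omega)
      rw [if_neg (by omega), if_neg (by omega)]
      exact ih e e' hle (fun y hy => hno y (by simp [hy]))

theorem pvG_nil (k : Nat) :
    ∀ (L : List Nat) (e : Nat), (∀ x ∈ L, x < e) → pvG k L e = [] := by
  intro L
  induction L with
  | nil => intro e _; rfl
  | cons x xs ih =>
    intro e hall
    rw [pvG]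
    rw [if_neg (by have := hall x (by simp); omega)]
    exact ih e (fun y hy => hall y (by simp [hy]))

theorem pvG_mem_ge (k : Nat) :
    ∀ (L : List Nat) (e x : Nat), x ∈ pvG k L e → e ≤ x := by
  intro L
  induction L with
  | nil => intro e x h; simp [pvG] at h
  | cons y ys ih =>
    intro e x h
    rw [pvG] at h
    by_cases hy : e ≤ y
    · rw [if_pos hy] at h
      rcases List.mem_cons.mp h with h1 | h2
      · omega
      · have := ih (y + k) x h2; omega
    · rw [if_neg hy] at h
      exact ih e x h

theorem pvG_cons_of_mem (k : Nat) :
    ∀ (L : List Nat) (e : Nat), L.Pairwise (· < ·) → e ∈ L →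
      pvG k L e = e :: pvG k (L.filter (fun x => decide (e < x))) (e + k) := by
  intro L
  induction L with
  | nil => intro e _ h; simp at h
  | cons x xs ih =>
    intro e hpw hmem
    rcases List.mem_cons.mp hmem with h1 | h2
    · subst h1
      rw [pvG, if_pos (le_refl _)]
      rw [List.filter_cons]
      rw [if_neg (by simp)]
      have h3 : xs.filter (fun y => decide (e < y)) = xs :=
        List.filter_eq_self.mpr (fun y hy => by
          simp only [decide_eq_true_eq]
          exact (List.pairwise_cons.mp hpw).1 y hy)
      rw [h3]
    · have hx : x < e := (List.pairwise_cons.mp hpw).1 e h2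
      rw [pvG, if_neg (by omega)]
      rw [List.filter_cons, if_neg (by simp; omega)]
      exact ih e (List.pairwise_cons.mp hpw).2 h2

theorem pvS_step (res after : List Char) (k : Nat) (e : Nat) (l : List Nat)
    (h : e < res.length) (hall : ∀ i ∈ l, e + 1 ≤ i) :
    pvS res after k e l = res.getD e ' ' :: pvS res after k (e + 1) l := by
  cases l with
  | nil =>
    rw [pvS, pvS, List.drop_eq_getElem_cons h, List.getD_eq_getElem res ' ' h]
  | cons i is =>
    rw [pvS, pvS]
    have hi : e + 1 ≤ i := hall i (by simp)
    rw [List.drop_eq_getElem_cons h, List.getD_eq_getElem res ' ' h]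
    have h1 : i - e = (i - (e + 1)) + 1 := by omega
    rw [h1, List.take_succ_cons]
    simp

-- the candidate condition forces the position inside the string
theorem pvCondB_lt (res before : List Char) (env : String) (j : Nat)
    (hb : before ≠ []) (h : pvCondB res before env j = true) : j < res.length := by
  unfold pvCondB at h
  have htake : (res.drop j).take before.length = before := by
    have := (Bool.and_eq_true _ _).mp h
    exact of_decide_eq_true this.1
  by_contra hge
  rw [List.drop_of_length_le (by omega), List.take_nil] at htake
  exact hb htake.symm

-- MAIN: the staged pipeline (greedy selection + stitching) equals A's scan
theorem pvGS_eq_scanA (res before after : List Char) (env : String) (hb : before ≠ []) :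
    ∀ (fuel e : Nat) (L : List Nat),
      res.length - e ≤ fuel →
      L.Pairwise (· < ·) →
      (∀ x ∈ L, pvCondB res before env x = true) →
      (∀ j, pvCondB res before env j = true → e ≤ j → j ∈ L) →
      pvS res after before.length e (pvG before.length L e) = pvScanA res before after env fuel e := by
  have hk : 1 ≤ before.length := List.length_pos_iff.mpr hb
  intro fuel
  induction fuel with
  | zero =>
    intro e L hf hpw hsub hcom
    have he : res.length ≤ e := by omega
    rw [pvG_nil _ L e (fun x hx => lt_of_lt_of_le (pvCondB_lt res before env x hb (hsub x hx)) he)]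
    rw [pvS, List.drop_of_length_le he]
    rw [pvScanA]
  | succ fuel ih =>
    intro e L hf hpw hsub hcom
    by_cases h : e < res.length
    · rw [pvScanA, if_pos h]
      by_cases hc : pvCondB res before env e = true
      · -- a chosen match at e
        have htake : (res.drop e).take before.length = before :=
          of_decide_eq_true ((Bool.and_eq_true _ _).mp hc).1
        have henv : pvEnvHolds res e before.length env = true :=
          ((Bool.and_eq_true _ _).mp hc).2
        rw [if_pos htake]
        have hmem : e ∈ L := hcom e hc (le_refl e)
        rw [pvG_cons_of_mem _ L e hpw hmem]
        rw [pvS]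
        have hm : (if env = "_V" then
              if res.length ≤ e + before.length then false
              else if pvIsVowelA (res.getD (e + before.length) ' ') then true else false
            else if env = "V_" then
              if e = 0 then false
              else if pvIsVowelA (res.getD (e - 1) ' ') then true else false
            else true) = true := by
          unfold pvEnvHolds at henv
          by_cases heV : env = "_V"
          · rw [if_pos heV]; rw [if_pos heV] at henv
            have := (Bool.and_eq_true _ _).mp henv
            rw [if_neg (by have := of_decide_eq_true this.1; omega)]
            rw [pvIteVowel]
            exact this.2
          · rw [if_neg heV]; rw [if_neg heV] at henv
            by_cases heP : env = "V_"
            · rw [if_pos heP]; rw [if_pos heP] at henv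
              have := (Bool.and_eq_true _ _).mp henv
              rw [if_neg (by have := of_decide_eq_true this.1; omega)]
              rw [pvIteVowel]
              exact this.2
            · rw [if_neg heP]
        rw [hm]
        simp only [reduceIte, Nat.sub_self, List.take_zero, List.nil_append]
        congr 1
        exact ih (e + before.length) (L.filter (fun x => decide (e < x)))
          (by omega)
          (hpw.filter _)
          (fun x hx => hsub x (List.mem_filter.mp hx).1)
          (fun j hj hje => List.mem_filter.mpr
            ⟨hcom j hj (by omega), by simp; omega⟩)
      · -- no match chosen at e
        have hnot : e ∉ L := fun hmem => hc (hsub e hmem)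
        have hshift : pvG before.length L e = pvG before.length L (e + 1) :=
          pvG_shift _ L e (e + 1) (by omega)
            (fun x hx hlt => by
              have : x ≠ e := fun hxe => hnot (hxe ▸ hx)
              omega)
        rw [hshift]
        rw [pvS_step res after before.length e _ h
          (fun i hi => pvG_mem_ge _ L (e + 1) i hi)]
        have htail : pvS res after before.length (e + 1) (pvG before.length L (e + 1)) =
            pvScanA res before after env fuel (e + 1) :=
          ih (e + 1) L (by omega) hpw hsub (fun j hj hje => hcom j hj (by omega))
        by_cases htake : (res.drop e).take before.length = before
        · rw [if_pos htake]
          have henv : pvEnvHolds res e before.length env = false := by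
            cases hev : pvEnvHolds res e before.length env with
            | false => rfl
            | true => exact absurd (by unfold pvCondB; rw [decide_eq_true htake, hev]; rfl) hc
          have hm : (if env = "_V" then
                if res.length ≤ e + before.length then false
                else if pvIsVowelA (res.getD (e + before.length) ' ') then true else false
              else if env = "V_" then
                if e = 0 then false
                else if pvIsVowelA (res.getD (e - 1) ' ') then true else false
              else true) = false := by
            unfold pvEnvHolds at henv
            by_cases heV : env = "_V"
            · rw [if_pos heV]; rw [if_pos heV] at henv
              by_cases hend : res.length ≤ e + before.length
              · rw [if_pos hend]
              · rw [if_neg hend]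
                rw [pvIteVowel]
                have : decide (e + before.length < res.length) = true := by
                  simp; omega
                rw [this, Bool.true_and] at henv
                exact henv
            · rw [if_neg heV]; rw [if_neg heV] at henv
              by_cases heP : env = "V_"
              · rw [if_pos heP]; rw [if_pos heP] at henv
                by_cases he0 : e = 0
                · rw [if_pos he0]
                · rw [if_neg he0]
                  rw [pvIteVowel]
                  have : decide (0 < e) = true := by simp; omega
                  rw [this, Bool.true_and] at henv
                  exact henv
              · rw [if_neg heP]; rw [if_neg heP] at henv; exact henv
          rw [hm]
          simp only [Bool.false_eq_true, if_false]
          rw [htail]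
        · rw [if_neg htake]
          rw [htail]
    · have : res.length ≤ e := by omega
      rw [pvScanA, if_neg h]
      rw [pvG_nil _ L e (fun x hx =>
        lt_of_lt_of_le (pvCondB_lt res before env x hb (hsub x hx)) this)]
      rw [pvS, List.drop_of_length_le this]

-- B's full per-rule pipeline equals A's scan
theorem pvStaged_eq_scanA (res before after : List Char) (env : String) (hb : before ≠ []) :
    pvStitch res after before.length
      (pvChosen before.length ((List.range res.length).filter (pvCondB res before env)))
    = pvScanA res before after env res.length 0 := by
  unfold pvChosen pvStitch
  rw [pvChosen_eq_G]
  simp only [List.nil_append]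
  rw [pvStitch_eq_S]
  simp only [List.flatten_nil, List.nil_append]
  exact pvGS_eq_scanA res before after env hb res.length 0 _
    (by omega)
    ((List.pairwise_lt_range).filter _)
    (fun x hx => (List.mem_filter.mp hx).2)
    (fun j hj _ => List.mem_filter.mpr
      ⟨List.mem_range.mpr (pvCondB_lt res before env j hb hj), hj⟩)

-- the two per-rule steps agree
theorem pvRule_eq (result : String) (rule : List (String × String)) :
    pvRuleA result rule = pvRuleB result rule := by
  unfold pvRuleA pvRuleB
  by_cases hba : PySem.Dict.getD (PySem.Dict.mk rule) "before" "" = "" ∨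
      PySem.Dict.getD (PySem.Dict.mk rule) "after" "" = ""
  · rw [if_pos hba, if_pos hba]
  · rw [if_neg hba, if_neg hba]
    have hb : (PySem.Dict.getD (PySem.Dict.mk rule) "before" "").toList ≠ [] := by
      intro hc
      exact hba (Or.inl (String.toList_eq_nil_iff.mp hc))
    by_cases he : (PySem.Dict.get? (PySem.Dict.mk rule) "environment").getD "" = ""
    · rw [if_pos he, he]
      rw [pvStaged_eq_scanA _ _ _ _ hb]
      rw [PySem.Str.replace]
      congr 1
      obtain ⟨b, bs, hbl⟩ := List.exists_cons_of_ne_nil hb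
      rw [hbl]
      rw [pvReplace_eq_scanB]
      rw [pvScanA_eq_scanB result.toList
        (PySem.Dict.getD (PySem.Dict.mk rule) "after" "").toList "" b bs
        result.toList.length 0 none (by omega) (by omega) (by simp)]
      rw [List.drop_zero]
    · rw [if_neg he]
      rw [pvStaged_eq_scanA _ _ _ _ hb]

theorem pvFold_eq (rules : List (List (String × String))) :
    ∀ (word : String), apply_sound_changes word rules = apply_sound_changes_alt word rules := by
  induction rules with
  | nil => intro word; rfl
  | cons r rs ih =>
    intro word
    unfold apply_sound_changes apply_sound_changes_alt at *
    simp only [List.foldl_cons]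
    rw [pvRule_eq]
    exact ih _

-- ===== VERDICT (by name: the statement is the Claim_ definition above) =====
theorem apply_sound_changes_spec : Claim_equal_apply_sound_changes := by
  intro word rules _
  unfold Spec_apply_sound_changes
  exact pvFold_eq rules word
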